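-- pv_equiv track=rewrite | github.com/kmjm231/Algorithm_Studying | Python/백준/Silver/1697. 숨바꼭질/숨바꼭질.py | find
-- ===== SOURCE A (Python) =====
-- from collections import deque
--
-- def find(N: int, K: int) -> int:
--     MAX = 100001
--     deq = deque([N])
--     visited = [-1] * MAX
--     visited[N] = 0
--
--     while deq:
--         x = deq.popleft()
--         if x == K:
--             return visited[x]
--         for i in [x - 1, x + 1, 2 * x]:
--             if 0 <= i < MAX and visited[i] == -1:
--                 visited[i] = visited[x] + 1
--                 deq.append(i)
-- ===== SOURCE B (Python) =====
-- def find(N: int, K: int) -> int: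
--     MAX = 100001
--     seen = [False] * MAX
--     seen[N] = True
--     frontier = [N]
--     steps = 0
--     while frontier:
--         if K in frontier:
--             return steps
--         nxt = []
--         for x in frontier:
--             for y in (x - 1, x + 1, 2 * x):
--                 if 0 <= y < MAX and not seen[y]:
--                     seen[y] = True
--                     nxt.append(y)
--         frontier = nxt
--         steps += 1
-- ===== Notes on version B (the rewrite author's own statement) =====
-- stated objective: alternative
-- what changed: Replaces the node-at-a-time deque BFS over a MAX-sized distance array by a level-synchronous BFS that expands a whole frontier list per round with a boolean seen-array, answering with a step counter when K appears in a frontier.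
-- outside the precondition, e.g. on find(-1, 0): A returns 1, B returns 1; on find(-1, 5): A returns 5, B returns 5; on find(0, 100001): A returns None, B returns None
import Mathlib
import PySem

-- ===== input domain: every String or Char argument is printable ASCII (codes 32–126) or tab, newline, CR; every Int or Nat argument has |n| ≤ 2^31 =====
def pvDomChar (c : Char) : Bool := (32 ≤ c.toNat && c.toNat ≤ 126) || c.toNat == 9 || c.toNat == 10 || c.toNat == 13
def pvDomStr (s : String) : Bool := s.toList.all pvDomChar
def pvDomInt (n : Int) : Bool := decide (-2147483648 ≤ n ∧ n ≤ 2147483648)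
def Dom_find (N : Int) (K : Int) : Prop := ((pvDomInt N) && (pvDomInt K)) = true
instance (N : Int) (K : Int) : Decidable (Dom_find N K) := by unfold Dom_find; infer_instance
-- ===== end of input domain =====

-- B replaces the node-at-a-time deque BFS with a distance array by a level-synchronous
-- BFS over a frontier list and a boolean seen-array (alternative structure, same cost).

-- ===== PORT A =====
-- deque → List Int (popleft = head, append = ++ [i]); the Python list 'visited' → Array Int
-- (O(1) indexing; every access is in range on Pre_ inputs, the getD default is never used there).
def stepA (x : Int) (p : List Int × Array Int) (i : Int) : List Int × Array Int :=
  if 0 ≤ i ∧ i < 100001 ∧ p.2.getD i.toNat 0 = -1 then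
    (p.1 ++ [i], p.2.setIfInBounds i.toNat (p.2.getD x.toNat 0 + 1))
  else p

-- the body of one pop: the 'for i in [x - 1, x + 1, 2 * x]' loop
def rowA (x : Int) (p : List Int × Array Int) : List Int × Array Int :=
  [x - 1, x + 1, 2 * x].foldl (stepA x) p

def goA (K : Int) : Nat → List Int → Array Int → Int
  | 0, _, _ => -1                    -- fuel guard only; never reached on Pre_ inputs (proved below)
  | _ + 1, [], _ => -1               -- Python falls off the loop and returns None: outside Pre_
  | fuel + 1, x :: rest, vis =>
    if x = K then vis.getD x.toNat 0
    else
      let p := rowA x (rest, vis)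
      goA K fuel p.1 p.2

def find (N : Int) (K : Int) : Int :=
  if 0 ≤ N ∧ N < 100001 then
    goA K 300000 [N] ((Array.replicate 100001 (-1)).setIfInBounds N.toNat 0)
  else -1                            -- Python raises IndexError / wraps a negative index: outside Pre_

-- ===== PORT B =====
-- the Python bool list 'seen' → Array Bool (O(1) indexing; in range on Pre_ inputs)
def stepB (p : Array Bool × List Int) (y : Int) : Array Bool × List Int :=
  if 0 ≤ y ∧ y < 100001 ∧ p.1.getD y.toNat false = false then
    (p.1.setIfInBounds y.toNat true, p.2 ++ [y])
  else p

-- the body for one frontier node: the 'for y in (x - 1, x + 1, 2 * x)' loop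
def rowB (p : Array Bool × List Int) (x : Int) : Array Bool × List Int :=
  [x - 1, x + 1, 2 * x].foldl stepB p

def goB (K : Int) : Nat → List Int → Array Bool → Int → Int
  | 0, _, _, _ => -1                 -- fuel guard only; never reached on Pre_ inputs (proved below)
  | _ + 1, [], _, _ => -1            -- Python's while-loop ends and returns None: outside Pre_
  | fuel + 1, frontier, seen, steps =>
    if frontier.contains K then steps
    else
      let p := frontier.foldl rowB (seen, ([] : List Int))
      goB K fuel p.2 p.1 (steps + 1)

def find_alt (N : Int) (K : Int) : Int :=
  if 0 ≤ N ∧ N < 100001 then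
    goB K 300000 [N] ((Array.replicate 100001 false).setIfInBounds N.toNat true) 0
  else -1                            -- Python raises IndexError / wraps a negative index: outside Pre_

-- ===== PRECONDITION & SPEC =====
-- Pre_ keeps exactly the intended board [0, 100000] for both arguments: outside it A raises
-- IndexError (N > 100000 or N < -100001), returns None instead of an int (K off the board, or
-- N < -1), or — for N = -1 only — returns a value that is an accident of Python's
-- negative-index wraparound (which B's own wraparound happens to reproduce).
def Pre_find (N : Int) (K : Int) : Prop :=
  0 ≤ N ∧ N ≤ 100000 ∧ 0 ≤ K ∧ K ≤ 100000
instance (N : Int) (K : Int) : Decidable (Pre_find N K) := by unfold Pre_find; infer_instance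

def pvWitness_find : Int × Int := (3, 11)

def Spec_find (N : Int) (K : Int) (out : Int) : Prop := out = find_alt N K
instance (N : Int) (K : Int) (out : Int) : Decidable (Spec_find N K out) := by
  unfold Spec_find; infer_instance

-- ===== CLAIM (what is proved, stated in full; the proofs are below) =====
def Claim_equal_find : Prop :=
  ∀ (N : Int) (K : Int), Dom_find N K → Pre_find N K → Spec_find N K (find N K)

-- ===== LEMMAS AND PROOFS =====

theorem pvGetD_set_self {α : Type} (a : Array α) (n : Nat) (v d : α) (h : n < a.size) :
    (a.setIfInBounds n v).getD n d = v := by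
  simp [Array.getD, Array.size_setIfInBounds, h]

theorem pvGetD_set_ne {α : Type} (a : Array α) (n m : Nat) (v d : α) (h : n ≠ m) :
    (a.setIfInBounds n v).getD m d = a.getD m d := by
  rw [Array.getD_eq_getD_getElem?, Array.getD_eq_getD_getElem?,
      Array.getElem?_setIfInBounds]
  simp [h]

-- the joint invariant: vis is A's distance array, seen is B's flag array, V the (ghost) list
-- of discovered cells, nxt the already-discovered part of level i+1
def pvRel (vis : Array Int) (seen : Array Bool) (V : List Int) : Prop :=
  vis.size = 100001 ∧ seen.size = 100001 ∧
  ∀ y : Int, 0 ≤ y → y < 100001 →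
    ((vis.getD y.toNat 0 = -1 ↔ y ∉ V) ∧ (seen.getD y.toNat false = true ↔ y ∈ V))

def pvInv (i : Int) (vis : Array Int) (seen : Array Bool) (V nxt : List Int) : Prop :=
  pvRel vis seen V ∧ V.Nodup ∧ (∀ v ∈ V, 0 ≤ v ∧ v < 100001) ∧
  (∀ z ∈ nxt, (0 ≤ z ∧ z < 100001) ∧ vis.getD z.toNat 0 = i + 1 ∧ z ∈ V)

theorem pvStep_sim (x y i : Int) (Q : List Int) (vis : Array Int) (seen : Array Bool)
    (V nxt : List Int)
    (hinv : pvInv i vis seen V nxt)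
    (hxv : vis.getD x.toNat 0 = i) (hi : 0 ≤ i) :
    ∃ Δ vis' seen',
      stepA x (Q ++ nxt, vis) y = (Q ++ (nxt ++ Δ), vis') ∧
      stepB (seen, nxt) y = (seen', nxt ++ Δ) ∧
      pvInv i vis' seen' (V ++ Δ) (nxt ++ Δ) ∧
      (∀ z : Int, 0 ≤ z → z < 100001 → vis.getD z.toNat 0 ≠ -1 →
        vis'.getD z.toNat 0 = vis.getD z.toNat 0) := by
  obtain ⟨⟨hvs, hss, hrel⟩, hnd, hVr, hnxt⟩ := hinv
  by_cases hy : 0 ≤ y ∧ y < 100001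
  · obtain ⟨hy0, hy1⟩ := hy
    obtain ⟨hv_iff, hs_iff⟩ := hrel y hy0 hy1
    by_cases hmem : y ∈ V
    · -- already discovered: both guards fail
      have hga : ¬ (vis.getD y.toNat 0 = -1) := fun h => (hv_iff.mp h) hmem
      have hgb : ¬ (seen.getD y.toNat false = false) := by
        have := hs_iff.mpr hmem; simp [this]
      refine ⟨[], vis, seen, ?_, ?_, ?_, fun _ _ _ _ => rfl⟩
      · unfold stepA; rw [if_neg (fun hc => hga hc.2.2)]; simp
      · unfold stepB; rw [if_neg (fun hc => hgb hc.2.2)]; simp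
      · simp only [List.append_nil]
        exact ⟨⟨hvs, hss, hrel⟩, hnd, hVr, hnxt⟩
    · -- fresh cell: both guards fire
      have hva : vis.getD y.toNat 0 = -1 := hv_iff.mpr hmem
      have hsb : seen.getD y.toNat false = false := by
        cases hsn : seen.getD y.toNat false with
        | true => exact absurd (hs_iff.mp hsn) hmem
        | false => rfl
      have hylt : y.toNat < vis.size := by omega
      have hylt' : y.toNat < seen.size := by omega
      refine ⟨[y], vis.setIfInBounds y.toNat (i + 1), seen.setIfInBounds y.toNat true,
        ?_, ?_, ?_, ?_⟩
      · unfold stepA; rw [if_pos ⟨hy0, hy1, hva⟩]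
        simp [hxv, List.append_assoc]
      · unfold stepB; rw [if_pos ⟨hy0, hy1, hsb⟩]
      · refine ⟨⟨by simp [hvs], by simp [hss], ?_⟩, ?_, ?_, ?_⟩
        · intro z hz0 hz1
          by_cases hzy : z = y
          · subst hzy
            rw [pvGetD_set_self _ _ _ _ hylt, pvGetD_set_self _ _ _ _ hylt']
            constructor
            · constructor
              · intro h; omega
              · intro h; exact absurd (by simp) h
            · simp
          · have htn : y.toNat ≠ z.toNat := by omega
            rw [pvGetD_set_ne _ _ _ _ _ htn, pvGetD_set_ne _ _ _ _ _ htn]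
            have := hrel z hz0 hz1
            simpa [hzy] using this
        · have hyV : y ∉ V := hmem
          simpa using List.Nodup.concat hyV hnd
        · intro v hv
          rcases List.mem_append.mp hv with h | h
          · exact hVr v h
          · simp at h; subst h; exact ⟨hy0, hy1⟩
        · intro z hz
          rcases List.mem_append.mp hz with h | h
          · obtain ⟨⟨hz0, hz1⟩, hzl, hzV⟩ := hnxt z h
            have hzy : z ≠ y := fun he => hmem (he ▸ hzV)
            have htn : y.toNat ≠ z.toNat := by omega
            rw [pvGetD_set_ne _ _ _ _ _ htn]
            exact ⟨⟨hz0, hz1⟩, hzl, List.mem_append.mpr (Or.inl hzV)⟩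
          · simp at h; subst h
            rw [pvGetD_set_self _ _ _ _ hylt]
            exact ⟨⟨hy0, hy1⟩, rfl, by simp⟩
      · intro z hz0 hz1 hzv
        have hzy : z ≠ y := fun he => hzv (he ▸ hva)
        have htn : y.toNat ≠ z.toNat := by omega
        rw [pvGetD_set_ne _ _ _ _ _ htn]
  · -- out of range: both guards fail
    refine ⟨[], vis, seen, ?_, ?_, ?_, fun _ _ _ _ => rfl⟩
    · unfold stepA; rw [if_neg (fun hc => hy ⟨hc.1, hc.2.1⟩)]; simp
    · unfold stepB; rw [if_neg (fun hc => hy ⟨hc.1, hc.2.1⟩)]; simp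
    · simp only [List.append_nil]
      exact ⟨⟨hvs, hss, hrel⟩, hnd, hVr, hnxt⟩

theorem pvInner_sim (x i : Int) (hi : 0 ≤ i) (hx0 : 0 ≤ x) (hx1 : x < 100001)
    (ys : List Int) :
    ∀ (vis : Array Int) (seen : Array Bool) (V nxt Q : List Int),
      pvInv i vis seen V nxt →
      vis.getD x.toNat 0 = i →
      ∃ Δ vis' seen',
        ys.foldl (stepA x) (Q ++ nxt, vis) = (Q ++ (nxt ++ Δ), vis') ∧
        ys.foldl stepB (seen, nxt) = (seen', nxt ++ Δ) ∧
        pvInv i vis' seen' (V ++ Δ) (nxt ++ Δ) ∧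
        (∀ z : Int, 0 ≤ z → z < 100001 → vis.getD z.toNat 0 ≠ -1 →
          vis'.getD z.toNat 0 = vis.getD z.toNat 0) := by
  induction ys with
  | nil =>
    intro vis seen V nxt Q hinv _
    exact ⟨[], vis, seen, by simp, by simp, by simpa, fun _ _ _ _ => rfl⟩
  | cons y ys ih =>
    intro vis seen V nxt Q hinv hxv
    obtain ⟨Δ₁, vis₁, seen₁, hA1, hB1, hinv₁, hpres₁⟩ :=
      pvStep_sim x y i Q vis seen V nxt hinv hxv hi
    have hxv₁ : vis₁.getD x.toNat 0 = i := by
      rw [hpres₁ x hx0 hx1 (by rw [hxv]; omega)]; exact hxv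
    obtain ⟨Δ₂, vis₂, seen₂, hA2, hB2, hinv₂, hpres₂⟩ :=
      ih vis₁ seen₁ (V ++ Δ₁) (nxt ++ Δ₁) Q hinv₁ hxv₁
    refine ⟨Δ₁ ++ Δ₂, vis₂, seen₂, ?_, ?_, ?_, ?_⟩
    · simp only [List.foldl_cons]
      rw [hA1, hA2, List.append_assoc]
    · simp only [List.foldl_cons]
      rw [hB1, hB2, List.append_assoc]
    · simpa [List.append_assoc] using hinv₂
    · intro z hz0 hz1 hzv
      rw [hpres₂ z hz0 hz1 (by rw [hpres₁ z hz0 hz1 hzv]; exact hzv),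
          hpres₁ z hz0 hz1 hzv]

theorem pvPhase_sim (K i : Int) (hi : 0 ≤ i) (R : List Int) :
    ∀ (rest : Nat) (vis : Array Int) (seen : Array Bool) (V nxt : List Int),
      pvInv i vis seen V nxt →
      (∀ x ∈ R, (0 ≤ x ∧ x < 100001) ∧ vis.getD x.toNat 0 = i) →
      ∃ Δ vis' seen',
        R.foldl rowB (seen, nxt) = (seen', nxt ++ Δ) ∧
        goA K (R.length + rest) (R ++ nxt) vis
          = (if K ∈ R then i else goA K rest (nxt ++ Δ) vis') ∧
        pvInv i vis' seen' (V ++ Δ) (nxt ++ Δ) := by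
  induction R with
  | nil =>
    intro rest vis seen V nxt hinv _
    refine ⟨[], vis, seen, by simp, ?_, by simpa⟩
    simp
  | cons x R' ih =>
    intro rest vis seen V nxt hinv hR
    obtain ⟨⟨hx0, hx1⟩, hxv⟩ := hR x List.mem_cons_self
    obtain ⟨Δ₁, vis₁, seen₁, hA1, hB1, hinv₁, hpres₁⟩ :=
      pvInner_sim x i hi hx0 hx1 [x - 1, x + 1, 2 * x] vis seen V nxt R' hinv hxv
    have hrowA : rowA x (R' ++ nxt, vis) = (R' ++ (nxt ++ Δ₁), vis₁) := hA1
    have hrowB : rowB (seen, nxt) x = (seen₁, nxt ++ Δ₁) := hB1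
    have hR' : ∀ z ∈ R', (0 ≤ z ∧ z < 100001) ∧ vis₁.getD z.toNat 0 = i := by
      intro z hz
      obtain ⟨⟨hz0, hz1⟩, hzv⟩ := hR z (List.mem_cons_of_mem _ hz)
      refine ⟨⟨hz0, hz1⟩, ?_⟩
      rw [hpres₁ z hz0 hz1 (by rw [hzv]; omega)]; exact hzv
    obtain ⟨Δ₂, vis₂, seen₂, hBfold, hAgo, hinv₂⟩ :=
      ih rest vis₁ seen₁ (V ++ Δ₁) (nxt ++ Δ₁) hinv₁ hR'
    have hlen : (x :: R').length + rest = (R'.length + rest) + 1 := by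
      simp [List.length_cons]; omega
    refine ⟨Δ₁ ++ Δ₂, vis₂, seen₂, ?_, ?_, ?_⟩
    · rw [List.foldl_cons, hrowB, hBfold, List.append_assoc]
    · rw [hlen]
      show goA K ((R'.length + rest) + 1) (x :: (R' ++ nxt)) vis = _
      by_cases hxK : x = K
      · simp only [goA, if_pos hxK]
        rw [if_pos (by simp [hxK])]
        exact hxK ▸ hxv
      · simp only [goA, if_neg hxK]
        rw [hrowA, hAgo]
        by_cases hK' : K ∈ R'
        · rw [if_pos hK', if_pos (List.mem_cons_of_mem _ hK')]
        · rw [if_neg hK', List.append_assoc,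
            if_neg (fun hc => (List.mem_cons.mp hc).elim (fun h => hxK h.symm) hK')]
    · simpa [List.append_assoc] using hinv₂

theorem pvLen_le (V : List Int) (hnd : V.Nodup) (hr : ∀ v ∈ V, 0 ≤ v ∧ v < 100001) :
    V.length ≤ 100001 := by
  have h1 : V.length = V.toFinset.card := (List.toFinset_card_of_nodup hnd).symm
  have h2 : V.toFinset ⊆ Finset.Ico (0 : ℤ) 100001 := by
    intro v hv
    rw [List.mem_toFinset] at hv
    obtain ⟨ha, hb⟩ := hr v hv
    rw [Finset.mem_Ico]; exact ⟨ha, hb⟩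
  have h3 := Finset.card_le_card h2
  have h4 : (Finset.Ico (0 : ℤ) 100001).card = 100001 := by simp
  omega

theorem pvMain_sim (K : Int) :
    ∀ (fuelB fuelA : Nat) (F : List Int) (vis : Array Int) (seen : Array Bool)
      (V : List Int) (steps : Int),
      pvInv steps vis seen V [] →
      (∀ x ∈ F, (0 ≤ x ∧ x < 100001) ∧ vis.getD x.toNat 0 = steps) →
      0 ≤ steps →
      fuelA ≥ F.length + 2 * (100001 - V.length) + 1 →
      fuelB ≥ 1 + (100001 - V.length) →
      goA K fuelA F vis = goB K fuelB F seen steps := by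
  intro fuelB
  induction fuelB with
  | zero => intro fuelA F vis seen V steps _ _ _ _ hfb; omega
  | succ fB ih =>
    intro fuelA F vis seen V steps hinv hF hst hfa hfb
    cases F with
    | nil =>
      obtain ⟨fa, rfl⟩ : ∃ fa, fuelA = fa + 1 := ⟨fuelA - 1, by omega⟩
      simp [goA, goB]
    | cons f0 F' =>
      obtain ⟨Δ, vis', seen', hBfold, hAgo, hinv'⟩ :=
        pvPhase_sim K steps hst (f0 :: F') (fuelA - (f0 :: F').length) vis seen V [] hinv hF
      have hrest : fuelA = (f0 :: F').length + (fuelA - (f0 :: F').length) := by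
        simp at hfa ⊢; omega
      rw [hrest]
      simp only [List.append_nil] at hAgo
      rw [hAgo]
      simp only [List.nil_append] at hBfold hinv'
      by_cases hK : K ∈ f0 :: F'
      · rw [if_pos hK]
        simp only [goB]
        rw [if_pos (by simpa [List.contains_iff_mem] using hK)]
      · rw [if_neg hK]
        simp only [goB]
        rw [if_neg (by simpa [List.contains_iff_mem] using hK)]
        rw [hBfold]
        have hnxtΔ := hinv'.2.2.2
        have hinv'' : pvInv (steps + 1) vis' seen' (V ++ Δ) [] :=
          ⟨hinv'.1, hinv'.2.1, hinv'.2.2.1, by simp⟩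
        have hbound := pvLen_le (V ++ Δ) hinv'.2.1 hinv'.2.2.1
        rw [List.length_append] at hbound
        cases Δ with
        | nil =>
          obtain ⟨r, hr⟩ : ∃ r, fuelA - (f0 :: F').length = r + 1 := by
            refine ⟨fuelA - (f0 :: F').length - 1, ?_⟩
            simp at hfa ⊢; omega
          rw [hr]
          cases fB with
          | zero => simp [goA, goB]
          | succ fB' => simp [goA, goB]
        | cons d0 Δ' =>
          apply ih (fuelA - (f0 :: F').length) (d0 :: Δ') vis' seen' (V ++ (d0 :: Δ'))
            (steps + 1) hinv''
            (fun z hz => ⟨(hnxtΔ z hz).1, (hnxtΔ z hz).2.1⟩)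
            (by omega)
          · simp only [List.length_cons, List.length_append] at hbound hfa ⊢
            omega
          · simp only [List.length_cons, List.length_append] at hbound hfb ⊢
            omega

theorem pvReplicate_getD (n : Nat) (hn : n < 100001) (d : Int) :
    (Array.replicate 100001 (-1 : Int)).getD n d = -1 := by
  simp [Array.getD, hn]

theorem pvReplicate_getD_bool (n : Nat) (hn : n < 100001) (d : Bool) :
    (Array.replicate 100001 false).getD n d = false := by
  simp [Array.getD, hn]

-- ===== VERDICT (by name: the statement is the Claim_ definition above) =====
theorem find_spec : Claim_equal_find := by
  intro N K _hdom hpre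
  obtain ⟨h1, h2, h3, h4⟩ := hpre
  unfold Spec_find find find_alt
  rw [if_pos ⟨h1, by omega⟩, if_pos ⟨h1, by omega⟩]
  have hNlt : N.toNat < (Array.replicate 100001 (-1 : Int)).size := by
    simp [Array.size_replicate]; omega
  have hNlt' : N.toNat < (Array.replicate 100001 false).size := by
    simp [Array.size_replicate]; omega
  apply pvMain_sim K 300000 300000 [N] _ _ [N] 0
  · refine ⟨⟨by simp, by simp, ?_⟩, by simp, ?_, by simp⟩
    · intro y hy0 hy1
      by_cases hyN : y = N
      · subst hyN
        rw [pvGetD_set_self _ _ _ _ hNlt, pvGetD_set_self _ _ _ _ hNlt']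
        constructor
        · constructor
          · intro h; omega
          · intro h; exact absurd (by simp) h
        · simp
      · have htn : N.toNat ≠ y.toNat := by omega
        rw [pvGetD_set_ne _ _ _ _ _ htn, pvGetD_set_ne _ _ _ _ _ htn]
        rw [pvReplicate_getD _ (by omega), pvReplicate_getD_bool _ (by omega)]
        simp [hyN]
    · intro v hv; simp at hv; subst hv; exact ⟨h1, by omega⟩
  · intro z hz; simp at hz; subst hz
    exact ⟨⟨h1, by omega⟩, pvGetD_set_self _ _ _ _ hNlt⟩
  · omega
  · simp
  · simp
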